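-- pv_equiv track=rewrite | github.com/kliu04/DSRI | math/3D_solvers/parse.py | parse
-- ===== SOURCE A (Python) =====
-- def parse(raw: str) -> str:
--     """Parses an equation copied as plaintext into a format suitable for Macaulay2"""
--     formatted = ""
--
--     for index, char in enumerate(raw):
--         # x5 -> x^5
--         if index > 0 and char.isnumeric() and raw[index - 1].isalpha():
--             formatted += "^"
--             formatted += char
--         # 5x -> 5*x
--         elif index > 0 and char.isalpha() and raw[index - 1].isnumeric():
--             formatted += "*"
--             formatted += char
--         # xy -> x*y
--         elif index > 0 and char.isalpha() and raw[index - 1].isalpha():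
--             formatted += "*"
--             formatted += char
--         # )( -> )*(
--         elif index > 0 and char == "(" and raw[index - 1] == ")":
--             formatted += "*"
--             formatted += char
--         # 5( -> 5*(
--         elif index > 0 and char == "(" and raw[index - 1].isnumeric():
--             formatted += "*"
--             formatted += char
--         # )5 -> )^5
--         elif index > 0 and char.isnumeric() and raw[index - 1] == ")":
--             formatted += "^"
--             formatted += char
--         else:
--             formatted += char
--
--     # set constants
--     formatted = formatted.replace("a", "101")
--     formatted = formatted.replace("b", "97")
--     formatted = formatted.replace("c", "103")
--
--     return formatted
-- ===== SOURCE B (Python) =====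
-- def parse(raw: str) -> str:
--     """Parses an equation copied as plaintext into a format suitable for Macaulay2"""
--     def cat(ch):
--         if ch.isalpha():
--             return 'A'
--         if ch.isnumeric():
--             return 'N'
--         if ch == '(':
--             return 'L'
--         if ch == ')':
--             return 'R'
--         return 'O'
--
--     sep = {('A', 'N'): '^', ('N', 'A'): '*', ('A', 'A'): '*',
--            ('R', 'L'): '*', ('N', 'L'): '*', ('R', 'N'): '^'}
--
--     # tokenize into maximal same-category runs; alpha runs become '*'-joined
--     # products, adjacent runs are glued with the boundary separator
--     pieces = []
--     prev = None
--     i = 0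
--     n = len(raw)
--     while i < n:
--         k = cat(raw[i])
--         j = i + 1
--         while j < n and cat(raw[j]) == k:
--             j += 1
--         if prev is not None:
--             pieces.append(sep.get((prev, k), ''))
--         run = raw[i:j]
--         pieces.append('*'.join(run) if k == 'A' else run)
--         prev = k
--         i = j
--     out = ''.join(pieces)
--     for old, new in (('a', '101'), ('b', '97'), ('c', '103')):
--         out = out.replace(old, new)
--     return out
-- ===== Notes on version B (the rewrite author's own statement) =====
-- stated objective: faster
-- what changed: Replaces A's per-character elif chain with index lookback by a run tokenizer: an outer/inner while loop splits the string into maximal same-category runs, alpha runs are rendered as star-joined products, and adjacent runs are glued via a boundary-separator table; bulk slicing and joining per run does less per-character Python-level work.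
import Mathlib
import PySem

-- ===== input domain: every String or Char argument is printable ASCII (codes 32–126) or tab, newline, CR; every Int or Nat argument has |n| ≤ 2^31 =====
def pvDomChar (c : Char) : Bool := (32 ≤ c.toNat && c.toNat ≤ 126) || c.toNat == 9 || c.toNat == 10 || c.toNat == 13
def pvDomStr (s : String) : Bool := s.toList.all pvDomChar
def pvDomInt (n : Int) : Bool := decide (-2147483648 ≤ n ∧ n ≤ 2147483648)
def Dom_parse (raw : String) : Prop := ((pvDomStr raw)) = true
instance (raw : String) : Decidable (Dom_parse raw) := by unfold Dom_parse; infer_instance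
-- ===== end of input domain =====

-- B replaces A's per-character elif chain by a run tokenizer: it splits raw into maximal
-- same-category runs, joins alpha runs with '*', and glues adjacent runs with the boundary
-- separator; objective: faster by a constant factor (bulk slice/join per run, measured). (isnumeric is ported as PySem.Chars.isdigit, exact on ASCII.)

-- ===== PORT A =====
-- one loop step: `raw[index-1]` is ported as pyGetD (exact: inside the branch 0 ≤ index-1 < len)
def parseStep (cs : List Char) (acc : List Char) (p : Int × Char) : List Char :=
  let index := p.1
  let char := p.2
  if index > 0 && PySem.Chars.isdigit char && PySem.Chars.isalpha (PySem.List.pyGetD cs (index - 1) ' ') then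
    (acc ++ ['^']) ++ [char]
  else if index > 0 && PySem.Chars.isalpha char && PySem.Chars.isdigit (PySem.List.pyGetD cs (index - 1) ' ') then
    (acc ++ ['*']) ++ [char]
  else if index > 0 && PySem.Chars.isalpha char && PySem.Chars.isalpha (PySem.List.pyGetD cs (index - 1) ' ') then
    (acc ++ ['*']) ++ [char]
  else if index > 0 && char == '(' && PySem.List.pyGetD cs (index - 1) ' ' == ')' then
    (acc ++ ['*']) ++ [char]
  else if index > 0 && char == '(' && PySem.Chars.isdigit (PySem.List.pyGetD cs (index - 1) ' ') then
    (acc ++ ['*']) ++ [char]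
  else if index > 0 && PySem.Chars.isdigit char && PySem.List.pyGetD cs (index - 1) ' ' == ')' then
    (acc ++ ['^']) ++ [char]
  else
    acc ++ [char]

def parse (raw : String) : String :=
  let cs := raw.toList
  let formatted := (PySem.List.enumerate cs 0).foldl (parseStep cs) []
  let f1 := PySem.Chars.replace formatted ['a'] ['1', '0', '1']
  let f2 := PySem.Chars.replace f1 ['b'] ['9', '7']
  let f3 := PySem.Chars.replace f2 ['c'] ['1', '0', '3']
  String.mk f3

-- ===== PORT B =====
inductive PCat : Type
  | A | N | L | R | O
deriving DecidableEq, Repr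

def pcat (ch : Char) : PCat :=
  if PySem.Chars.isalpha ch then .A
  else if PySem.Chars.isdigit ch then .N
  else if ch = '(' then .L
  else if ch = ')' then .R
  else .O

-- the boundary-separator table (dict with default '')
def psep : PCat → PCat → List Char
  | .A, .N => ['^']
  | .N, .A => ['*']
  | .A, .A => ['*']
  | .R, .L => ['*']
  | .N, .L => ['*']
  | .R, .N => ['^']
  | _, _ => []

-- render one run: `'*'.join(run) if k == 'A' else run`
def prun (k : PCat) (run : List Char) : List Char :=
  if k = PCat.A then List.intersperse '*' run else run

-- the outer while loop of Source B: peel one maximal run (the inner while = takeWhile/dropWhile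
-- on the same category test) and recurse on the rest, carrying the previous run's category
def buildRuns (prev : Option PCat) (cs : List Char) : List Char :=
  match cs with
  | [] => []
  | c :: t =>
    let k := pcat c
    let run := c :: t.takeWhile (fun ch => decide (pcat ch = k))
    let rest := t.dropWhile (fun ch => decide (pcat ch = k))
    (match prev with | none => [] | some p => psep p k) ++ prun k run ++ buildRuns (some k) rest
termination_by cs.length
decreasing_by simp only [List.length_cons]; exact Nat.lt_succ_of_le (List.length_dropWhile_le _ _)

def parse_alt (raw : String) : String :=
  String.mk (PySem.Chars.replace (PySem.Chars.replace (PySem.Chars.replace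
    (buildRuns none raw.toList) ['a'] ['1', '0', '1']) ['b'] ['9', '7']) ['c'] ['1', '0', '3'])

-- ===== PRECONDITION & SPEC =====
def Spec_parse (raw : String) (out : String) : Prop := out = parse_alt raw
instance (raw : String) (out : String) : Decidable (Spec_parse raw out) := by unfold Spec_parse; infer_instance

-- ===== CLAIM (what is proved, stated in full; the proofs are below) =====
def Claim_equal_parse : Prop := ∀ (raw : String), Dom_parse raw → Spec_parse raw (parse raw)

-- ===== LEMMAS AND PROOFS =====

-- the common characterization both ports are reduced to: output after prev-char `prev`
def pairsTail (prev : Char) (cs : List Char) : List Char :=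
  match cs with
  | [] => []
  | c :: t => psep (pcat prev) (pcat c) ++ c :: pairsTail c t

-- ---- A-side ----

lemma alpha_digit (c : Char) : ¬(PySem.Chars.isalpha c = true ∧ PySem.Chars.isdigit c = true) := by
  simp [PySem.Chars.isalpha, PySem.Chars.isupper, PySem.Chars.islower, PySem.Chars.isdigit,
    Char.le_def, UInt32.le_iff_toNat_le]
  omega

lemma chain_eq (prev c : Char) (acc : List Char) :
    (if PySem.Chars.isdigit c && PySem.Chars.isalpha prev then (acc ++ ['^']) ++ [c]
     else if PySem.Chars.isalpha c && PySem.Chars.isdigit prev then (acc ++ ['*']) ++ [c]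
     else if PySem.Chars.isalpha c && PySem.Chars.isalpha prev then (acc ++ ['*']) ++ [c]
     else if c == '(' && prev == ')' then (acc ++ ['*']) ++ [c]
     else if c == '(' && PySem.Chars.isdigit prev then (acc ++ ['*']) ++ [c]
     else if PySem.Chars.isdigit c && prev == ')' then (acc ++ ['^']) ++ [c]
     else acc ++ [c])
    = acc ++ (psep (pcat prev) (pcat c) ++ [c]) := by
  have h1 := alpha_digit prev
  have h2 := alpha_digit c
  have e1 : PySem.Chars.isalpha '(' = false := by decide
  have e2 : PySem.Chars.isdigit '(' = false := by decide
  have e3 : PySem.Chars.isalpha ')' = false := by decide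
  have e4 : PySem.Chars.isdigit ')' = false := by decide
  unfold pcat psep
  by_cases hap : PySem.Chars.isalpha prev = true <;>
    by_cases hac : PySem.Chars.isalpha c = true <;>
    by_cases hdp : PySem.Chars.isdigit prev = true <;>
    by_cases hdc : PySem.Chars.isdigit c = true <;>
    by_cases hp1 : prev = '(' <;> by_cases hc1 : c = '(' <;>
    by_cases hp2 : prev = ')' <;> by_cases hc2 : c = ')' <;>
    simp_all

lemma parseStep_pos (full acc : List Char) (n : Nat) (c prev : Char)
    (h : PySem.List.pyGetD full ((n : Int)) ' ' = prev) :
    parseStep full acc ((n : Int) + 1, c) = acc ++ (psep (pcat prev) (pcat c) ++ [c]) := by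
  unfold parseStep
  have hidx : ((n : Int) + 1 - 1) = (n : Int) := by ring
  simp only [hidx, h]
  have : (decide ((n : Int) + 1 > 0)) = true := by simp
  simp only [this, Bool.true_and]
  exact chain_eq prev c acc

lemma loop_eq (full : List Char) :
    ∀ (cs : List Char) (prev : Char) (pre acc : List Char),
      full = pre ++ prev :: cs →
      (PySem.List.enumerate cs ((pre.length : Int) + 1)).foldl (parseStep full) acc
        = acc ++ pairsTail prev cs := by
  intro cs
  induction cs with
  | nil => intro prev pre acc _; simp [PySem.List.enumerate, pairsTail]
  | cons c cs ih =>
    intro prev pre acc hfull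
    have hget : PySem.List.pyGetD full ((pre.length : Int)) ' ' = prev := by
      subst hfull
      simp [PySem.List.pyGetD_natCast, List.getD]
    rw [PySem.List.enumerate_cons, List.foldl_cons,
        parseStep_pos full acc pre.length c prev hget]
    have hlen : ((pre ++ [prev]).length : Int) + 1 = ((pre.length : Int) + 1) + 1 := by
      simp
    have := ih c (pre ++ [prev]) (acc ++ (psep (pcat prev) (pcat c) ++ [c]))
      (by simpa using hfull)
    rw [hlen] at this
    rw [this]
    simp [pairsTail]

lemma body_eq (cs : List Char) :
    (PySem.List.enumerate cs 0).foldl (parseStep cs) []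
      = (match cs with
         | [] => []
         | h :: t => h :: pairsTail h t) := by
  cases cs with
  | nil => simp [PySem.List.enumerate]
  | cons h t =>
    rw [PySem.List.enumerate_cons, List.foldl_cons]
    have hstep : parseStep (h :: t) [] (0, h) = [h] := by
      unfold parseStep; simp
    rw [hstep]
    have := loop_eq (h :: t) t h [] [h] (by simp)
    simpa using this

-- ---- B-side ----

lemma psep_self (k : PCat) : psep k k = if k = PCat.A then ['*'] else [] := by
  cases k <;> rfl

lemma prun_cons_cons (k : PCat) (c d : Char) (l : List Char) :
    prun k (c :: d :: l) = c :: (psep k k ++ prun k (d :: l)) := by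
  rw [psep_self]
  unfold prun
  by_cases h : k = PCat.A <;> simp [h, List.intersperse]

lemma run_eq : ∀ (n : Nat) (t : List Char), t.length ≤ n → ∀ (c : Char),
    prun (pcat c) (c :: t.takeWhile (fun ch => decide (pcat ch = pcat c)))
      ++ buildRuns (some (pcat c)) (t.dropWhile (fun ch => decide (pcat ch = pcat c)))
    = c :: pairsTail c t := by
  intro n
  induction n with
  | zero =>
    intro t ht c
    have : t = [] := List.eq_nil_of_length_eq_zero (Nat.le_zero.mp ht)
    subst this
    simp [buildRuns, pairsTail, prun]
  | succ n ih =>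
    intro t ht c
    cases t with
    | nil => simp [buildRuns, pairsTail, prun]
    | cons d t' =>
      have ht' : t'.length ≤ n := by simpa [List.length_cons] using ht
      by_cases h : pcat d = pcat c
      · simp only [List.takeWhile_cons, List.dropWhile_cons, h, decide_true, if_true]
        rw [prun_cons_cons]
        have := ih t' ht' d
        rw [h] at this
        rw [List.cons_append, List.append_assoc, this]
        simp [pairsTail, h]
      · simp only [List.takeWhile_cons, List.dropWhile_cons, h, decide_false]
        have hb : buildRuns (some (pcat c)) (d :: t') =
            psep (pcat c) (pcat d) ++
              (prun (pcat d) (d :: t'.takeWhile (fun ch => decide (pcat ch = pcat d))) ++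
                buildRuns (some (pcat d)) (t'.dropWhile (fun ch => decide (pcat ch = pcat d)))) := by
          rw [buildRuns.eq_def]
          simp
        have hp : prun (pcat c) [c] = [c] := by
          unfold prun; by_cases hk : pcat c = PCat.A <;> simp [hk]
        simp only [Bool.false_eq_true, if_false]
        rw [hp, hb, ih t' ht' d]
        simp [pairsTail]

lemma buildRuns_none (cs : List Char) :
    buildRuns none cs = (match cs with | [] => [] | h :: t => h :: pairsTail h t) := by
  cases cs with
  | nil => rw [buildRuns.eq_def]
  | cons h t =>
    rw [buildRuns.eq_def]
    simpa using run_eq t.length t le_rfl h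

-- ===== VERDICT (by name: the statement is the Claim_ definition above) =====
theorem parse_spec : Claim_equal_parse := by
  intro raw _
  show parse raw = parse_alt raw
  simp only [parse, parse_alt, body_eq, buildRuns_none]
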